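-- pv_equiv track=rewrite | github.com/broadinstitute/stp_segmentation_wdl | common_python_scripts/utils.py | tile_coords
-- ===== SOURCE A (Python) =====
-- def tile_coords(image_height, image_width,
--                 tile_height, tile_width,
--                 overlap):
--
--     """This function returns a list of tile coordinates from a larger image.
--
--     Parameters
--     -----------
--     image_height: Height of original large image
--     image_width: Width of original large image
--     tile_height: Height of tile
--     tile_width: Width of tile
--
--     Returns
--     -----------
--     tile_boundaries_list: list of list containing min/max coordinates of each tile
--     """
--
--     tile_boundaries_list = []
--
--     y_min = 0
--     while y_min < image_height:
--         y_max = min(y_min + tile_height, image_height)  # Adjust y_max if it exceeds image height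
--
--         x_min = 0
--         while x_min < image_width:
--             x_max = min(x_min + tile_width, image_width)  # Adjust x_max if it exceeds image width
--
--             #tile_boundaries_list.append(y_min, y_max, x_min, x_max)
--
--             tile_boundaries_list.append([y_min, y_max, x_min, x_max])
--
--             x_min += (tile_width - overlap)  # Move to the next tile with overlap
--
--         y_min += (tile_height - overlap)  # Move to the next row of tiles with overlap
--
--     return tile_boundaries_list
-- ===== SOURCE B (Python) =====
-- def tile_coords(image_height, image_width,
--                 tile_height, tile_width,
--                 overlap):
--     """Closed-form tile count + one flat pass: count rows/cols by ceiling
--     division, then decode each flat tile index k into (row, col) with divmod."""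
--     if image_height <= 0 or image_width <= 0:
--         return []
--     sy = tile_height - overlap
--     sx = tile_width - overlap
--     rows = (image_height + sy - 1) // sy
--     cols = (image_width + sx - 1) // sx
--     return [[(k // cols) * sy,
--              min((k // cols) * sy + tile_height, image_height),
--              (k % cols) * sx,
--              min((k % cols) * sx + tile_width, image_width)]
--             for k in range(rows * cols)]
-- ===== Notes on version B (the rewrite author's own statement) =====
-- stated objective: alternative
-- what changed: Replaces A's nested while loops stepping mutable y_min/x_min accumulators by a closed-form ceiling-division count of rows and columns followed by ONE flat loop over range(rows*cols) that decodes each flat tile index into its (row, col) position with divmod; return value only, no side effects.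
import Mathlib
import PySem

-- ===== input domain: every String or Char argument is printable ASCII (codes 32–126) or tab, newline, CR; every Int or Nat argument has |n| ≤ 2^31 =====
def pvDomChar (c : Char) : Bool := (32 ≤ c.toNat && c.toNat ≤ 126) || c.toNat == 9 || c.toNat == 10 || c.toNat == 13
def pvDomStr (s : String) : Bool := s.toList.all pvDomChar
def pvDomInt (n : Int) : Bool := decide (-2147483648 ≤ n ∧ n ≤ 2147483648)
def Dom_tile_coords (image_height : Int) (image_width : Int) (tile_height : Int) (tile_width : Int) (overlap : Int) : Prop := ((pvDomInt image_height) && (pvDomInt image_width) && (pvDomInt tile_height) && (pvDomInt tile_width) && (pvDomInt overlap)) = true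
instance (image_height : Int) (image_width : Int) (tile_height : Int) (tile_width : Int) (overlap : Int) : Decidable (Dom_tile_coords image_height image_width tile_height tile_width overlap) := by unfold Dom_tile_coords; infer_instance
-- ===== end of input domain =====

-- B replaces A's nested while loops by a closed-form ceiling-division tile count and one flat
-- loop that decodes each tile index with divmod (alternative decomposition; return value only).

-- ===== PORT A =====
-- A's while loops, one step at a time; the fuel only makes the recursion total
-- (inside Pre_ the stride is ≥ 1 whenever the loop runs, so ≤ dim+1 iterations suffice).
def tcInnerA (image_width : Int) (tile_width : Int) (overlap : Int) (y_min : Int) (y_max : Int) (x_min : Int) : Nat → List (List Int)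
  | 0 => []
  | fuel+1 =>
    if x_min < image_width then
      let x_max := min (x_min + tile_width) image_width
      [y_min, y_max, x_min, x_max] ::
        tcInnerA image_width tile_width overlap y_min y_max (x_min + (tile_width - overlap)) fuel
    else []

def tcOuterA (image_height : Int) (image_width : Int) (tile_height : Int) (tile_width : Int) (overlap : Int) (y_min : Int) : Nat → List (List Int)
  | 0 => []
  | fuel+1 =>
    if y_min < image_height then
      let y_max := min (y_min + tile_height) image_height
      tcInnerA image_width tile_width overlap y_min y_max 0 (image_width.toNat + 1) ++
        tcOuterA image_height image_width tile_height tile_width overlap (y_min + (tile_height - overlap)) fuel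
    else []

def tile_coords (image_height : Int) (image_width : Int) (tile_height : Int) (tile_width : Int) (overlap : Int) : List (List Int) :=
  tcOuterA image_height image_width tile_height tile_width overlap 0 (image_height.toNat + 1)

-- ===== PORT B =====
def tile_coords_alt (image_height : Int) (image_width : Int) (tile_height : Int) (tile_width : Int) (overlap : Int) : List (List Int) :=
  if image_height ≤ 0 ∨ image_width ≤ 0 then []
  else
    let sy := tile_height - overlap
    let sx := tile_width - overlap
    let rows := PySem.Int.floordiv (image_height + sy - 1) sy
    let cols := PySem.Int.floordiv (image_width + sx - 1) sx
    (PySem.List.pyRange 0 (rows * cols) 1).map (fun k =>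
      [PySem.Int.floordiv k cols * sy,
       min (PySem.Int.floordiv k cols * sy + tile_height) image_height,
       PySem.Int.mod k cols * sx,
       min (PySem.Int.mod k cols * sx + tile_width) image_width])

-- ===== PRECONDITION & SPEC =====
-- Pre_ excludes exactly the inputs on which A's while loops never terminate
-- (a non-positive stride on an axis whose loop actually runs); A returns on all of Pre_.
def Pre_tile_coords (image_height : Int) (image_width : Int) (tile_height : Int) (tile_width : Int) (overlap : Int) : Prop :=
  image_height ≤ 0 ∨ (0 < tile_height - overlap ∧ (image_width ≤ 0 ∨ 0 < tile_width - overlap))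
instance (image_height : Int) (image_width : Int) (tile_height : Int) (tile_width : Int) (overlap : Int) : Decidable (Pre_tile_coords image_height image_width tile_height tile_width overlap) := by unfold Pre_tile_coords; infer_instance

def pvWitness_tile_coords : Int × Int × Int × Int × Int := (10, 10, 4, 4, 1)

def Spec_tile_coords (image_height : Int) (image_width : Int) (tile_height : Int) (tile_width : Int) (overlap : Int) (out : List (List Int)) : Prop := out = tile_coords_alt image_height image_width tile_height tile_width overlap
instance (image_height : Int) (image_width : Int) (tile_height : Int) (tile_width : Int) (overlap : Int) (out : List (List Int)) : Decidable (Spec_tile_coords image_height image_width tile_height tile_width overlap out) := by unfold Spec_tile_coords; infer_instance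

-- ===== CLAIM (what is proved, stated in full; the proofs are below) =====
def Claim_equal_tile_coords : Prop := ∀ (image_height : Int) (image_width : Int) (tile_height : Int) (tile_width : Int) (overlap : Int), Dom_tile_coords image_height image_width tile_height tile_width overlap → Pre_tile_coords image_height image_width tile_height tile_width overlap → Spec_tile_coords image_height image_width tile_height tile_width overlap (tile_coords image_height image_width tile_height tile_width overlap)

-- ===== LEMMAS AND PROOFS =====

theorem pyRange_pos_nil (a b s : Int) (hs : 0 < s) (h : b ≤ a) :
    PySem.List.pyRange a b s = [] := by
  rw [PySem.List.pyRange_of_pos a b hs]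
  simp [show ¬ a < b by omega]

theorem pyRange_pos_cons (a b s : Int) (hs : 0 < s) (h : a < b) :
    PySem.List.pyRange a b s = a :: PySem.List.pyRange (a + s) b s := by
  rw [PySem.List.pyRange_of_pos a b hs, PySem.List.pyRange_of_pos (a + s) b hs]
  have hkey : (if a < b then ((b - a + s - 1) / s).toNat else 0)
      = (if a + s < b then ((b - (a + s) + s - 1) / s).toNat else 0) + 1 := by
    rw [if_pos h]
    have h1 : b - a + s - 1 = (b - a - 1) + 1 * s := by ring
    have h2 : (b - a + s - 1) / s = (b - a - 1) / s + 1 := by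
      rw [h1, Int.add_mul_ediv_right _ _ (by omega : s ≠ 0)]
    by_cases hc : a + s < b
    · rw [if_pos hc]
      have : b - (a + s) + s - 1 = b - a - 1 := by ring
      rw [this, h2]
      have hnn : 0 ≤ (b - a - 1) / s := Int.ediv_nonneg (by omega) (by omega)
      omega
    · rw [if_neg hc]
      have hz : (b - a - 1) / s = 0 := Int.ediv_eq_zero_of_lt (by omega) (by omega)
      rw [h2, hz]; rfl
  rw [hkey, List.range_succ_eq_map, List.map_cons, List.map_map]
  refine congrArg₂ _ (by simp) (List.map_congr_left ?_)
  intro k _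
  simp [Function.comp, Nat.succ_eq_add_one]
  ring

theorem tcInnerA_eq (w tw ov y ym : Int) (hs : 0 < tw - ov) :
    ∀ (fuel : Nat) (x0 : Int), (w - x0).toNat ≤ fuel →
      tcInnerA w tw ov y ym x0 fuel
        = (PySem.List.pyRange x0 w (tw - ov)).map (fun x => [y, ym, x, min (x + tw) w]) := by
  intro fuel
  induction fuel with
  | zero =>
    intro x0 hf
    rw [pyRange_pos_nil _ _ _ hs (by omega)]
    rfl
  | succ n ih =>
    intro x0 hf
    by_cases hx : x0 < w
    · rw [pyRange_pos_cons _ _ _ hs hx]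
      simp only [tcInnerA, if_pos hx, List.map_cons]
      exact congrArg₂ _ rfl (ih (x0 + (tw - ov)) (by omega))
    · rw [pyRange_pos_nil _ _ _ hs (by omega)]
      simp [tcInnerA, hx]

theorem tcOuterA_eq (h w th tw ov : Int) (hs : 0 < th - ov) :
    ∀ (fuel : Nat) (y0 : Int), (h - y0).toNat ≤ fuel →
      tcOuterA h w th tw ov y0 fuel
        = (PySem.List.pyRange y0 h (th - ov)).flatMap
            (fun y => tcInnerA w tw ov y (min (y + th) h) 0 (w.toNat + 1)) := by
  intro fuel
  induction fuel with
  | zero =>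
    intro y0 hf
    rw [pyRange_pos_nil _ _ _ hs (by omega)]
    rfl
  | succ n ih =>
    intro y0 hf
    by_cases hy : y0 < h
    · rw [pyRange_pos_cons _ _ _ hs hy]
      simp only [tcOuterA, if_pos hy, List.flatMap_cons]
      exact congrArg₂ _ rfl (ih (y0 + (th - ov)) (by omega))
    · rw [pyRange_pos_nil _ _ _ hs (by omega)]
      simp [tcOuterA, hy]

-- flat index decoding: a row-major double loop is one flat loop over range (R*C) with divmod.
-- Stated in the exact shapes the pyRange rewrites leave in the verdict proof.
theorem grid_int (C : Nat) (hC : 0 < C) (G : Int → Int → List Int) (sy sx : Int) :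
    ∀ (R : Nat),
      ((List.range R).map (fun (i : Nat) => (0:Int) + sy * (i:Int))).flatMap
          (fun y => ((List.range C).map (fun (j : Nat) => (0:Int) + sx * (j:Int))).map
            (fun x => G y x))
        = ((List.range (R * C)).map (fun (k : Nat) => (0:Int) + (k:Int))).map
            (fun k => G (PySem.Int.floordiv k (C:Int) * sy) (PySem.Int.mod k (C:Int) * sx)) := by
  intro R
  induction R with
  | zero => simp
  | succ n ih =>
    rw [List.range_succ, List.map_append, List.flatMap_append, ih, Nat.succ_mul,
        List.range_add, List.map_append, List.map_append]
    congr 1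
    simp only [List.map_cons, List.map_nil, List.flatMap_cons, List.flatMap_nil,
      List.append_nil, List.map_map]
    apply List.map_congr_left
    intro j hj
    simp only [List.mem_range] at hj
    have h1 : (n * C + j) / C = n := by
      rw [Nat.mul_comm n C, Nat.add_comm, Nat.add_mul_div_left j n hC, Nat.div_eq_of_lt hj]
      omega
    have h2 : (n * C + j) % C = j := by
      rw [Nat.mul_comm n C, Nat.add_comm, Nat.add_mul_mod_self_left, Nat.mod_eq_of_lt hj]
    simp only [Function.comp_apply, zero_add, PySem.Int.floordiv_natCast,
      PySem.Int.mod_natCast, h1, h2]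
    have hy : sy * (n:Int) = (n:Int) * sy := by ring
    have hx : sx * (j:Int) = (j:Int) * sx := by ring
    rw [hy, hx]

-- ===== VERDICT (by name: the statement is the Claim_ definition above) =====
theorem tile_coords_spec : Claim_equal_tile_coords := by
  intro h w th tw ov _ hpre
  unfold Spec_tile_coords tile_coords tile_coords_alt
  by_cases hh : h ≤ 0
  · simp [tcOuterA, show ¬ (0:Int) < h by omega, hh]
  · have hsy : 0 < th - ov := by
      rcases hpre with h1 | ⟨h2, h3⟩
      · omega
      · exact h2
    rw [tcOuterA_eq h w th tw ov hsy _ 0 (by omega)]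
    by_cases hw : w ≤ 0
    · have hinner : ∀ y ym : Int, tcInnerA w tw ov y ym 0 (w.toNat + 1) = [] := by
        intro y ym
        have : w.toNat = 0 := by omega
        rw [this]
        simp [tcInnerA, show ¬ (0:Int) < w by omega]
      simp [hinner, hw, show (h ≤ 0) = False by simp; omega]
    · have hsx : 0 < tw - ov := by
        rcases hpre with h1 | ⟨h2, h3⟩
        · omega
        · rcases h3 with h3 | h3
          · omega
          · exact h3
      have hfun : (fun y => tcInnerA w tw ov y (min (y + th) h) 0 (w.toNat + 1))
          = (fun y => (PySem.List.pyRange 0 w (tw - ov)).map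
              (fun x => [y, min (y + th) h, x, min (x + tw) w])) := by
        funext y
        exact tcInnerA_eq w tw ov y (min (y + th) h) hsx (w.toNat + 1) 0 (by omega)
      rw [hfun, if_neg (by omega : ¬ (h ≤ 0 ∨ w ≤ 0))]
      simp only [PySem.Int.floordiv_eq_ediv_of_pos hsy, PySem.Int.floordiv_eq_ediv_of_pos hsx]
      have hrows_pos : 0 < (h + (th - ov) - 1) / (th - ov) := by
        have := (Int.le_ediv_iff_mul_le (a := 1) (b := h + (th - ov) - 1) hsy).mpr (by omega)
        omega
      have hcols_pos : 0 < (w + (tw - ov) - 1) / (tw - ov) := by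
        have := (Int.le_ediv_iff_mul_le (a := 1) (b := w + (tw - ov) - 1) hsx).mpr (by omega)
        omega
      set rows : Int := (h + (th - ov) - 1) / (th - ov) with hrows
      set cols : Int := (w + (tw - ov) - 1) / (tw - ov) with hcols
      have hcr : ((rows.toNat : Int)) = rows := Int.toNat_of_nonneg (by omega)
      have hcc : ((cols.toNat : Int)) = cols := Int.toNat_of_nonneg (by omega)
      rw [PySem.List.pyRange_of_pos 0 h hsy, PySem.List.pyRange_of_pos 0 w hsx,
          if_pos (by omega : (0:Int) < h), if_pos (by omega : (0:Int) < w),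
          PySem.List.pyRange_one]
      have hRA : ((h - 0 + (th - ov) - 1) / (th - ov)).toNat = rows.toNat := by
        rw [hrows]; norm_num
      have hCA : ((w - 0 + (tw - ov) - 1) / (tw - ov)).toNat = cols.toNat := by
        rw [hcols]; norm_num
      have hN : (rows * cols - 0).toNat = rows.toNat * cols.toNat := by
        have hx : rows * cols - 0 = ((rows.toNat * cols.toNat : Nat) : Int) := by
          rw [sub_zero, Nat.cast_mul, hcr, hcc]
        rw [hx, Int.toNat_natCast]
      rw [hRA, hCA, hN]
      have hg := grid_int cols.toNat (by omega)
        (fun y x => [y, min (y + th) h, x, min (x + tw) w]) (th - ov) (tw - ov) rows.toNat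
      rw [hcc] at hg
      exact hg
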